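-- pv_equiv track=rewrite | github.com/shunkongcheung/crestedmyna | backend/game/gme_sudoku/utils/get_is_board_valid.py | get_is_row_unique
-- ===== SOURCE A (Python) =====
-- def get_is_row_unique(board, row_idx, ignore_empty):
--     row_values = []
--     for column_idx in range(0, 9):
--         cur_item = board[row_idx][column_idx]
--         if cur_item == '' and ignore_empty:
--             continue
--         if cur_item in row_values:
--             return False
--         row_values.append(cur_item)
--     return True
-- ===== SOURCE B (Python) =====
-- def get_is_row_unique(board, row_idx, ignore_empty):
--     row = board[row_idx]
--     vals = sorted(v for v in row[:9] if not (v == '' and ignore_empty))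
--     return len(row) >= 9 and all(a != b for a, b in zip(vals, vals[1:]))
-- ===== Notes on version B (the rewrite author's own statement) =====
-- stated objective: alternative
-- what changed: B collects the kept values of the first nine cells, SORTS them, and detects duplicates by scanning adjacent pairs of the sorted list, instead of A's index loop that scans an accumulator for membership and early-returns False; a sudoku row of fewer than 9 cells is simply invalid in B.
import Mathlib
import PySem

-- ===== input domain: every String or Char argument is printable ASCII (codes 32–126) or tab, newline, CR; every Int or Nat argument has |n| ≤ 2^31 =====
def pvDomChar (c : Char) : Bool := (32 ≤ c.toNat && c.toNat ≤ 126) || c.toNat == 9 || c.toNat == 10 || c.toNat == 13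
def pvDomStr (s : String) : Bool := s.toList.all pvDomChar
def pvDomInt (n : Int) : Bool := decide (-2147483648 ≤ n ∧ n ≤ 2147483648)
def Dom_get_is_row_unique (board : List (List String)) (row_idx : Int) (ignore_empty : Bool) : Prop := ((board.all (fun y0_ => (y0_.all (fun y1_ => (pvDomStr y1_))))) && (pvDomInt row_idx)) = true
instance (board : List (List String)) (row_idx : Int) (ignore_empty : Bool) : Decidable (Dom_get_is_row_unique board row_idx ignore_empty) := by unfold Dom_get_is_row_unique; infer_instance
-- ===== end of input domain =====

-- B collects the kept values of the first nine cells, sorts them, and detects duplicates by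
-- scanning adjacent pairs of the sorted list (sort-then-scan), instead of A's index loop with
-- an accumulator membership scan and early return; a row shorter than 9 cells is invalid in B.


-- ===== PORT A =====
-- A's loop over range(0,9): accumulator row_values, early return False on a repeated item.
def goA (row : List String) (ignore_empty : Bool) : List Int → List String → Bool
  | [], _ => true
  | c :: cs, acc =>
    match PySem.List.pyGet? row c with
    | none => false   -- IndexError in Python: outside Pre_
    | some cur =>
      if cur == "" && ignore_empty then goA row ignore_empty cs acc
      else if acc.contains cur then false
      else goA row ignore_empty cs (acc ++ [cur])

def get_is_row_unique (board : List (List String)) (row_idx : Int) (ignore_empty : Bool) : Bool :=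
  match PySem.List.pyGet? board row_idx with
  | none => false   -- IndexError in Python: outside Pre_
  | some row => goA row ignore_empty (PySem.List.pyRange 0 9 1) []

-- ===== PORT B =====
def get_is_row_unique_alt (board : List (List String)) (row_idx : Int) (ignore_empty : Bool) : Bool :=
  match PySem.List.pyGet? board row_idx with
  | none => false   -- IndexError in Python: outside Pre_
  | some row =>
    let vals := PySem.List.sorted
      ((PySem.List.slice row none (some 9)).filter (fun v => !(v == "" && ignore_empty)))
      (fun x => x) false
    decide (9 ≤ row.length) && (vals.zip vals.tail).all (fun p => p.1 != p.2)

-- ===== PRECONDITION & SPEC =====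
-- the kept values of the row's first nine cells ('' dropped when ignore_empty)
def keptVals (row : List String) (ignore_empty : Bool) : List String :=
  (row.take 9).filter (fun v => !(v == "" && ignore_empty))

-- Pre_ excludes exactly the inputs on which A raises IndexError: an out-of-range row index,
-- and rows shorter than 9 cells whose kept values are all distinct (A runs past the end there).
def Pre_get_is_row_unique (board : List (List String)) (row_idx : Int) (ignore_empty : Bool) : Prop :=
  PySem.Raise.InRange board.length row_idx ∧
    (9 ≤ (PySem.List.pyGetD board row_idx []).length ∨
      ¬ (keptVals (PySem.List.pyGetD board row_idx []) ignore_empty).Nodup)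
instance (board : List (List String)) (row_idx : Int) (ignore_empty : Bool) : Decidable (Pre_get_is_row_unique board row_idx ignore_empty) := by unfold Pre_get_is_row_unique; infer_instance

def pvWitness_get_is_row_unique : List (List String) × Int × Bool :=
  ([["1","2","3","4","5","6","7","8",""]], 0, true)

def Spec_get_is_row_unique (board : List (List String)) (row_idx : Int) (ignore_empty : Bool) (out : Bool) : Prop := out = get_is_row_unique_alt board row_idx ignore_empty
instance (board : List (List String)) (row_idx : Int) (ignore_empty : Bool) (out : Bool) : Decidable (Spec_get_is_row_unique board row_idx ignore_empty out) := by unfold Spec_get_is_row_unique; infer_instance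

-- ===== CLAIM (what is proved, stated in full; the proofs are below) =====
def Claim_equal_get_is_row_unique : Prop := ∀ (board : List (List String)) (row_idx : Int) (ignore_empty : Bool), Dom_get_is_row_unique board row_idx ignore_empty → Pre_get_is_row_unique board row_idx ignore_empty → Spec_get_is_row_unique board row_idx ignore_empty (get_is_row_unique board row_idx ignore_empty)
-- ===== LEMMAS AND PROOFS =====

-- the values A's loop would keep while scanning the index list cs (missing cells dropped)
def valsOf (row : List String) (ignore_empty : Bool) (cs : List Int) : List String :=
  cs.filterMap (fun c =>
    match PySem.List.pyGet? row c with
    | none => none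
    | some v => if v == "" && ignore_empty then none else some v)

lemma nodup_append_singleton {x : String} {acc : List String} (hacc : acc.Nodup)
    (hx : x ∉ acc) : (acc ++ [x]).Nodup := by
  rw [List.nodup_append]
  refine ⟨hacc, List.nodup_singleton x, ?_⟩
  intro a ha b hb hab
  have hbx : b = x := by simpa using hb
  exact hx (hbx ▸ hab ▸ ha)

-- for a ≤-ordered list, adjacent distinctness of the zip scan is exactly Nodup
lemma zipall_ne_iff_nodup : ∀ xs : List String, xs.Pairwise (· ≤ ·) →
    (((xs.zip xs.tail).all (fun p => p.1 != p.2) = true) ↔ xs.Nodup) := by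
  intro xs
  induction xs with
  | nil => intro _; simp
  | cons x xs ih =>
    intro hp
    have hle : ∀ y ∈ xs, x ≤ y := (List.pairwise_cons.mp hp).1
    have hp' : xs.Pairwise (· ≤ ·) := (List.pairwise_cons.mp hp).2
    cases xs with
    | nil => simp
    | cons y t =>
      have hih := ih hp'
      simp only [List.tail_cons, List.zip_cons_cons, List.all_cons, Bool.and_eq_true,
        bne_iff_ne, ne_eq] at hih ⊢
      rw [List.nodup_cons]
      constructor
      · rintro ⟨hxy, hrest⟩
        refine ⟨?_, hih.mp hrest⟩
        intro hmem
        rcases List.mem_cons.mp hmem with h | h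
        · exact hxy h
        · have hyx : y ≤ x := ((List.pairwise_cons.mp hp').1) x h
          have hxy' : x ≤ y := hle y (List.mem_cons_self ..)
          exact hxy (le_antisymm hxy' hyx)
      · rintro ⟨hnotmem, hnd⟩
        exact ⟨fun h => hnotmem (h ▸ List.mem_cons_self ..), hih.mpr hnd⟩

lemma sorted_zipall_iff (xs : List String) :
    (((PySem.List.sorted xs (fun x => x) false).zip
        (PySem.List.sorted xs (fun x => x) false).tail).all (fun p => p.1 != p.2) = true)
      ↔ xs.Nodup := by
  have hperm := PySem.List.sorted_perm xs (fun x => x) false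
  have hpw : (PySem.List.sorted xs (fun x => x) false).Pairwise (· ≤ ·) := by
    simpa using PySem.List.sorted_pairwise xs (fun x => x)
  rw [zipall_ne_iff_nodup _ hpw]
  exact hperm.nodup_iff

lemma goA_spec (row : List String) (ie : Bool) (cs : List Int)
    (hall : ∀ c ∈ cs, (PySem.List.pyGet? row c).isSome) :
    ∀ acc : List String, acc.Nodup →
      (goA row ie cs acc = true ↔ (acc ++ valsOf row ie cs).Nodup) := by
  induction cs with
  | nil => intro acc hacc; simpa [goA, valsOf] using hacc
  | cons c cs ih =>
    intro acc hacc
    obtain ⟨v, hv⟩ := Option.isSome_iff_exists.mp (hall c (List.mem_cons_self ..))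
    have hall' : ∀ c ∈ cs, (PySem.List.pyGet? row c).isSome :=
      fun c hc => hall c (List.mem_cons_of_mem _ hc)
    cases hskip : (v == "" && ie) with
    | true =>
      simp only [goA, valsOf, List.filterMap_cons, hv, hskip, if_true]
      exact ih hall' acc hacc
    | false =>
      cases hcont : acc.contains v with
      | true =>
        have hmem : v ∈ acc := by simpa using hcont
        simp only [goA, valsOf, List.filterMap_cons, hv, hskip, Bool.false_eq_true, if_false, hcont, if_true]
        constructor
        · intro h; cases h
        · intro h
          have hd := List.disjoint_of_nodup_append h
          exact absurd (hd hmem (by simp)) (by simp)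
      | false =>
        have hmem : v ∉ acc := by simpa using hcont
        have hacc' : (acc ++ [v]).Nodup := nodup_append_singleton hacc hmem
        have hih := ih hall' (acc ++ [v]) hacc'
        rw [List.append_assoc, List.singleton_append] at hih
        simp only [goA, valsOf, List.filterMap_cons, hv, hskip, Bool.false_eq_true, if_false, hcont]
        rw [hih]
        rfl

lemma goA_false (row : List String) (ie : Bool) : ∀ (cs : List Int) (acc : List String),
    acc.Nodup → ¬ (acc ++ valsOf row ie cs).Nodup → goA row ie cs acc = false := by
  intro cs
  induction cs with
  | nil =>
    intro acc hacc hdup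
    simp only [valsOf, List.filterMap_nil, List.append_nil] at hdup
    exact absurd hacc hdup
  | cons c cs ih =>
    intro acc hacc hdup
    cases hv : PySem.List.pyGet? row c with
    | none => simp [goA, hv]
    | some v =>
      cases hskip : (v == "" && ie) with
      | true =>
        simp only [goA, hv, hskip, if_true]
        apply ih acc hacc
        simpa only [valsOf, List.filterMap_cons, hv, hskip, if_true] using hdup
      | false =>
        cases hcont : acc.contains v with
        | true => simp only [goA, hv, hskip, Bool.false_eq_true, if_false, hcont, if_true]
        | false =>
          have hmem : v ∉ acc := by simpa using hcont
          simp only [goA, hv, hskip, Bool.false_eq_true, if_false, hcont]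
          apply ih (acc ++ [v]) (nodup_append_singleton hacc hmem)
          rw [List.append_assoc, List.singleton_append]
          intro h
          apply hdup
          simpa only [valsOf, List.filterMap_cons, hv, hskip, Bool.false_eq_true, if_false] using h

lemma valsOf_eq_kept (row : List String) (ie : Bool) : ∀ n : Nat,
    valsOf row ie (PySem.List.pyRange 0 (n : Int) 1) =
      (row.take n).filter (fun v => !(v == "" && ie)) := by
  intro n
  induction n with
  | zero => simp [valsOf, PySem.List.pyRange_one_eq_nil]
  | succ n ih =>
    have hcast : ((n + 1 : Nat) : Int) = (n : Int) + 1 := by push_cast; ring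
    rw [hcast, PySem.List.pyRange_one_succ_right (by positivity)]
    simp only [valsOf, List.filterMap_append] at ih ⊢
    rw [ih, List.take_add_one, List.filter_append]
    congr 1
    simp only [List.filterMap_cons, List.filterMap_nil, PySem.List.pyGet?_natCast]
    cases hv : row[n]? with
    | none => simp
    | some v =>
      cases hskip : (v == "" && ie) with
      | true =>
        have hp : v = "" ∧ ie = true := by simpa using hskip
        simp [hp]
      | false =>
        have himp : v = "" → ie = false := by simpa using hskip
        have hp1 : ¬(v = "" ∧ ie = true) := fun ⟨h1, h2⟩ => by simp [himp h1] at h2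
        have hp2 : ¬v = "" ∨ ie = false := by
          by_cases h : v = ""
          · exact Or.inr (himp h)
          · exact Or.inl h
        simp [hp1, hp2]

-- ===== VERDICT (by name: the statement is the Claim_ definition above) =====
theorem get_is_row_unique_spec : Claim_equal_get_is_row_unique := by
  intro board row_idx ie _hdom hpre
  unfold Spec_get_is_row_unique
  obtain ⟨hin, hpre2⟩ := hpre
  cases hrow : PySem.List.pyGet? board row_idx with
  | none => exact absurd hin ((PySem.List.pyGet?_eq_none_iff _ _).mp hrow)
  | some row =>
    have hD : PySem.List.pyGetD board row_idx [] = row := by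
      simp [PySem.List.pyGetD, hrow]
    rw [hD] at hpre2
    have hveq : valsOf row ie (PySem.List.pyRange 0 9 1) = keptVals row ie := by
      have := valsOf_eq_kept row ie 9
      simpa [keptVals] using this
    have hslice : PySem.List.slice row none (some 9) = row.take 9 := by
      simpa using PySem.List.slice_to_natCast row 9
    unfold get_is_row_unique get_is_row_unique_alt
    rw [hrow]
    simp only [hslice]
    by_cases hlen : 9 ≤ row.length
    · have hall : ∀ c ∈ PySem.List.pyRange 0 9 1, (PySem.List.pyGet? row c).isSome := by
        intro c hc
        have hcb := (PySem.List.mem_pyRange_one).mp hc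
        rw [Option.isSome_iff_ne_none]
        intro hnone
        apply (PySem.List.pyGet?_eq_none_iff _ _).mp hnone
        simp only [PySem.Raise.InRange]
        omega
      have hA := goA_spec row ie (PySem.List.pyRange 0 9 1) hall [] (by simp)
      simp only [List.nil_append, hveq] at hA
      rw [Bool.eq_iff_iff, hA]
      simp only [Bool.and_eq_true, decide_eq_true_eq]
      rw [sorted_zipall_iff]
      constructor
      · intro h; exact ⟨hlen, by simpa [keptVals] using h⟩
      · intro ⟨_, h⟩; simpa [keptVals] using h
    · have hdup : ¬ (keptVals row ie).Nodup := by
        rcases hpre2 with h | h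
        · exact absurd h hlen
        · exact h
      have hA := goA_false row ie (PySem.List.pyRange 0 9 1) [] (by simp)
        (by simpa [hveq] using hdup)
      rw [hA]
      simp [hlen]
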